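-- pv_equiv track=rewrite | github.com/RaizenLab/MRLIS | curveFitting.py | find_constant_p_segments
-- ===== SOURCE A (Python) =====
-- def find_constant_p_segments(times, powers, temps, min_points=4):
--     segments = []
--     start = 0
--     for i in range(1, len(times)):
--         if powers[i] != powers[start]:
--             if i - start >= min_points:
--                 segments.append((start, i - 1))
--             start = i
--     if len(times) - start >= min_points:
--         segments.append((start, len(times) - 1))
--     return segments
-- ===== SOURCE B (Python) =====
-- def find_constant_p_segments(times, powers, temps, min_points=4):
--     n = len(times)
--     cuts = [0]
--     for i in range(1, n):
--         if powers[i] != powers[i - 1]: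
--             cuts.append(i)
--     cuts.append(n)
--     return [(a, b - 1) for a, b in zip(cuts, cuts[1:]) if b - a >= min_points]
-- ===== Notes on version B (the rewrite author's own statement) =====
-- stated objective: idiomatic
-- what changed: Instead of tracking a mutable run-start inline with nested conditionals, B first collects the list of run-boundary indices (where powers[i] != powers[i-1]) and then emits the qualifying (start, end) pairs in one comprehension over consecutive boundaries.
import Mathlib
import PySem

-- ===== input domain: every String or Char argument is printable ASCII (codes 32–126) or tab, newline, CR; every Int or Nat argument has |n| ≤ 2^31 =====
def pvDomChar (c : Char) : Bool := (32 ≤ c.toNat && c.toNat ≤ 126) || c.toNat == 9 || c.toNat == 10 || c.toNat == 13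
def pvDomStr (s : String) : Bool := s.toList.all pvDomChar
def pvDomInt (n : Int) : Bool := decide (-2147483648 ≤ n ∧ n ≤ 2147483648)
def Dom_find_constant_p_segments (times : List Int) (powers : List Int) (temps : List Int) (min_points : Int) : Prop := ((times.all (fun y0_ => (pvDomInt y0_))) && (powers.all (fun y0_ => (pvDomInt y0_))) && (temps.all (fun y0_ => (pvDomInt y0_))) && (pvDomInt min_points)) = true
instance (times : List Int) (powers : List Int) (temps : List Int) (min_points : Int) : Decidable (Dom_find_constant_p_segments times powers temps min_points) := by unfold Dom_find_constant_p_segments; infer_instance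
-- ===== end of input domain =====

-- B replaces A's inline run-start bookkeeping by an explicit boundary-index list followed by one
-- pass over consecutive boundaries (objective: more idiomatic decomposition; same O(n) cost).

-- ===== PORT A =====
-- loop body of A's 'for i in range(1, len(times))': state = (segments, start);
-- powers[i] / powers[start] are ported as pyGetD (in range under Pre_, where Python does not raise)
def pvStepA (powers : List Int) (min_points : Int) (s : List (Int × Int) × Int) (i : Int) : List (Int × Int) × Int :=
  if PySem.List.pyGetD powers i 0 ≠ PySem.List.pyGetD powers s.2 0 then
    (if i - s.2 ≥ min_points then s.1 ++ [(s.2, i - 1)] else s.1, i)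
  else s

def find_constant_p_segments (times : List Int) (powers : List Int) (temps : List Int) (min_points : Int) : List (Int × Int) :=
  let n : Int := PySem.List.len times
  let st := (PySem.List.pyRange 1 n 1).foldl (pvStepA powers min_points) ([], 0)
  if n - st.2 ≥ min_points then st.1 ++ [(st.2, n - 1)] else st.1

-- ===== PORT B =====
-- loop body of B's 'for i in range(1, n)': appends i to cuts when powers[i] != powers[i-1]
def pvStepB (powers : List Int) (c : List Int) (i : Int) : List Int :=
  if PySem.List.pyGetD powers i 0 ≠ PySem.List.pyGetD powers (i - 1) 0 then c ++ [i] else c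

def find_constant_p_segments_alt (times : List Int) (powers : List Int) (temps : List Int) (min_points : Int) : List (Int × Int) :=
  let n : Int := PySem.List.len times
  let cuts := (PySem.List.pyRange 1 n 1).foldl (pvStepB powers) [0]
  let cuts2 := cuts ++ [n]
  ((cuts2.zip cuts2.tail).filter (fun ab => decide (ab.2 - ab.1 ≥ min_points))).map (fun ab => (ab.1, ab.2 - 1))

-- ===== PRECONDITION & SPEC =====
-- Pre_ excludes exactly the inputs where the Python raises IndexError: when len(times) ≥ 2 the
-- loop indexes powers[i] for i < len(times), so powers must be at least as long as times.
def Pre_find_constant_p_segments (times : List Int) (powers : List Int) (temps : List Int) (min_points : Int) : Prop :=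
  times.length ≤ 1 ∨ times.length ≤ powers.length
instance (times : List Int) (powers : List Int) (temps : List Int) (min_points : Int) : Decidable (Pre_find_constant_p_segments times powers temps min_points) := by unfold Pre_find_constant_p_segments; infer_instance

def pvWitness_find_constant_p_segments : List Int × List Int × List Int × Int := ([0, 1, 2, 3], [5, 5, 7, 7], [9, 9, 9, 9], 2)

def Spec_find_constant_p_segments (times : List Int) (powers : List Int) (temps : List Int) (min_points : Int) (out : List (Int × Int)) : Prop := out = find_constant_p_segments_alt times powers temps min_points
instance (times : List Int) (powers : List Int) (temps : List Int) (min_points : Int) (out : List (Int × Int)) : Decidable (Spec_find_constant_p_segments times powers temps min_points out) := by unfold Spec_find_constant_p_segments; infer_instance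

-- ===== CLAIM (what is proved, stated in full; the proofs are below) =====
def Claim_equal_find_constant_p_segments : Prop := ∀ (times : List Int) (powers : List Int) (temps : List Int) (min_points : Int), Dom_find_constant_p_segments times powers temps min_points → Pre_find_constant_p_segments times powers temps min_points → Spec_find_constant_p_segments times powers temps min_points (find_constant_p_segments times powers temps min_points)

-- ===== LEMMAS AND PROOFS =====

-- the comprehension over consecutive cuts, as a function of the cut list
def pairsFM (min_points : Int) (l : List Int) : List (Int × Int) :=
  ((l.zip l.tail).filter (fun ab => decide (ab.2 - ab.1 ≥ min_points))).map (fun ab => (ab.1, ab.2 - 1))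

lemma pairsFM_cons2 (mp x b : Int) (t : List Int) :
    pairsFM mp (x :: b :: t) = (if b - x ≥ mp then [(x, b - 1)] else []) ++ pairsFM mp (b :: t) := by
  simp only [pairsFM, List.tail_cons, List.zip_cons_cons, List.filter_cons]
  split_ifs with h <;> simp_all

lemma pairsFM_append_last (mp : Int) (l : List Int) (a y : Int) (h : l.getLast? = some a) :
    pairsFM mp (l ++ [y]) = pairsFM mp l ++ (if y - a ≥ mp then [(a, y - 1)] else []) := by
  induction l with
  | nil => simp at h
  | cons x t ih =>
    cases t with
    | nil =>
      simp at h
      subst h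
      by_cases hxy : mp ≤ y - x <;> simp [pairsFM, ge_iff_le, hxy]
    | cons b t' =>
      have h' : (b :: t').getLast? = some a := by
        simpa [List.getLast?_cons_cons] using h
      have : (x :: b :: t') ++ [y] = x :: b :: (t' ++ [y]) := by simp
      rw [this]
      rw [pairsFM_cons2, show b :: (t' ++ [y]) = (b :: t') ++ [y] by simp, ih h',
        pairsFM_cons2, List.append_assoc]

lemma loop_inv (powers : List Int) (mp : Int) (N : Nat) :
    ((PySem.List.pyRange 1 (N : Int) 1).foldl (pvStepB powers) [0]).getLast? =
      some ((PySem.List.pyRange 1 (N : Int) 1).foldl (pvStepA powers mp) ([], 0)).2 ∧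
    pairsFM mp ((PySem.List.pyRange 1 (N : Int) 1).foldl (pvStepB powers) [0]) =
      ((PySem.List.pyRange 1 (N : Int) 1).foldl (pvStepA powers mp) ([], 0)).1 ∧
    (N ≠ 0 →
      PySem.List.pyGetD powers ((PySem.List.pyRange 1 (N : Int) 1).foldl (pvStepA powers mp) ([], 0)).2 0 =
      PySem.List.pyGetD powers ((N : Int) - 1) 0) := by
  induction N with
  | zero =>
    rw [PySem.List.pyRange_one_eq_nil (by norm_num)]
    simp [pairsFM]
  | succ N ih =>
    by_cases hN : N = 0
    · subst hN
      rw [show ((0 : Nat) + 1 : Nat) = (1 : Nat) by rfl]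
      rw [PySem.List.pyRange_one_eq_nil (by norm_num)]
      simp [pairsFM]
    · have h1 : (1 : Int) ≤ (N : Int) := by omega
      have hr : PySem.List.pyRange 1 ((N + 1 : Nat) : Int) 1 =
          PySem.List.pyRange 1 (N : Int) 1 ++ [(N : Int)] := by
        push_cast
        exact PySem.List.pyRange_one_succ_right h1
      rw [hr, List.foldl_append, List.foldl_append]
      simp only [List.foldl_cons, List.foldl_nil]
      obtain ⟨hlast, hpairs, hP⟩ := ih
      have hPv := hP hN
      have hcast : ((N + 1 : Nat) : Int) - 1 = (N : Int) := by push_cast; ring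
      set sA := (PySem.List.pyRange 1 (N : Int) 1).foldl (pvStepA powers mp) ([], 0) with hsA
      set c := (PySem.List.pyRange 1 (N : Int) 1).foldl (pvStepB powers) [0] with hc
      unfold pvStepA pvStepB
      rw [hPv]
      by_cases hcond : PySem.List.pyGetD powers (N : Int) 0 = PySem.List.pyGetD powers ((N : Int) - 1) 0
      · -- no new boundary at N
        rw [if_neg (by simpa using hcond), if_neg (by simpa using hcond)]
        refine ⟨hlast, hpairs, fun _ => ?_⟩
        rw [hcast, hPv, hcond]
      · -- new boundary at N
        rw [if_pos (by simpa using hcond), if_pos (by simpa using hcond)]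
        refine ⟨by simp, ?_, fun _ => by rw [hcast]⟩
        rw [pairsFM_append_last mp c sA.2 (N : Int) hlast, hpairs]
        split_ifs with h <;> simp

-- ===== VERDICT (by name: the statement is the Claim_ definition above) =====
theorem find_constant_p_segments_spec : Claim_equal_find_constant_p_segments := by
  unfold Claim_equal_find_constant_p_segments
  intro times powers temps mp _ _
  unfold Spec_find_constant_p_segments
  unfold find_constant_p_segments find_constant_p_segments_alt
  simp only [PySem.List.len_eq]
  obtain ⟨hlast, hpairs, -⟩ := loop_inv powers mp times.length
  set sA := (PySem.List.pyRange 1 (times.length : Int) 1).foldl (pvStepA powers mp) ([], 0) with hsA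
  set c := (PySem.List.pyRange 1 (times.length : Int) 1).foldl (pvStepB powers) [0] with hc
  show (if (times.length : Int) - sA.2 ≥ mp then sA.1 ++ [(sA.2, (times.length : Int) - 1)] else sA.1) =
    pairsFM mp (c ++ [(times.length : Int)])
  rw [pairsFM_append_last mp c sA.2 (times.length : Int) hlast, hpairs]
  split_ifs with h <;> simp
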